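-- pv_equiv track=rewrite | github.com/dylanbuchi/advent-of-code | 2023/day1/main.py | find_digit_part_2
-- ===== SOURCE A (Python) =====
-- def find_digit_part_2(word, reverse=False):
--     word_to_digit = {
--         "one": "1",
--         "two": "2",
--         "three": "3",
--         "four": "4",
--         "five": "5",
--         "six": "6",
--         "seven": "7",
--         "eight": "8",
--         "nine": "9",
--     }
--
--     if reverse:
--         word_to_digit = {key[::-1]: word_to_digit[key] for key in word_to_digit}
--         word = word[::-1]
--
--     for i in range(len(word)):
--         for ch, digit in word_to_digit.items():
--             if word[i:].startswith(ch):
--                 return digit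
--         if word[i].isdigit():
--             return word[i]
-- ===== SOURCE B (Python) =====
-- def find_digit_part_2(word, reverse=False):
--     names = "one two three four five six seven eight nine".split()
--     word_to_digit = {name: str(i) for i, name in enumerate(names, 1)}
--     if reverse:
--         word_to_digit = {key[::-1]: digit for key, digit in word_to_digit.items()}
--         word = word[::-1]
--
--     best = None  # (index, digit) with the smallest index seen so far
--     for key, digit in word_to_digit.items():
--         j = word.find(key)
--         if j != -1 and (best is None or j < best[0]):
--             best = (j, digit)
--     for i in range(len(word)):
--         if word[i].isdigit():
--             if best is None or i < best[0]:
--                 best = (i, word[i])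
--             break
--     return None if best is None else best[1]
-- ===== Notes on version B (the rewrite author's own statement) =====
-- stated objective: alternative
-- what changed: A's single interleaved position scan (at each index try all nine spelled digits, then the digit test) is replaced by nine independent str.find searches plus one scan for the first digit character, keeping the (index, digit) pair with the smallest index (earliest candidate wins ties).
import Mathlib
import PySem

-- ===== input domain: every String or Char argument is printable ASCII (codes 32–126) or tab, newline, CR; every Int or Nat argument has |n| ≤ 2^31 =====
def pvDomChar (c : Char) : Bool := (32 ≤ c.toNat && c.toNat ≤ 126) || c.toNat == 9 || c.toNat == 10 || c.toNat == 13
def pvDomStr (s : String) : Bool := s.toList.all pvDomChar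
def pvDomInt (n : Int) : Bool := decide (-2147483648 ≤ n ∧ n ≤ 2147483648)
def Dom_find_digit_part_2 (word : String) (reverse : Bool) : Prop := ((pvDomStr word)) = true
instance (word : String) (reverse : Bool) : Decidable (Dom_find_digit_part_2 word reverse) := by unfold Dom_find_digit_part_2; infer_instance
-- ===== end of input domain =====

-- B replaces A's interleaved left-to-right position scan by nine independent substring
-- searches plus one first-digit scan, selecting the candidate with the smallest index
-- (objective: alternative structure, same cost).

-- A's word→digit dict literal
def fdp2_pairs : List (String × String) :=
  [("one","1"),("two","2"),("three","3"),("four","4"),("five","5"),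
   ("six","6"),("seven","7"),("eight","8"),("nine","9")]

-- ===== PORT A =====
-- inner loop: `for ch, digit in word_to_digit.items(): if word[i:].startswith(ch): return digit`
def fdp2_tryPairs (s : List Char) : List (String × String) → Option String
  | [] => none
  | (k, d) :: ps =>
      if PySem.Chars.startswith s k.toList then some d else fdp2_tryPairs s ps

-- outer loop `for i in range(len(word))`: structural recursion on the suffix word[i:]
def fdp2_scan (ps : List (String × String)) : List Char → Option String
  | [] => none
  | c :: rest =>
      match fdp2_tryPairs (c :: rest) ps with
      | some d => some d
      | none =>
          if PySem.Chars.isdigit c then some (String.ofList [c]) else fdp2_scan ps rest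

def find_digit_part_2 (word : String) (reverse : Bool) : Option String :=
  let ps := if reverse then fdp2_pairs.map (fun kd => (String.ofList kd.1.toList.reverse, kd.2)) else fdp2_pairs
  let w := if reverse then word.toList.reverse else word.toList
  fdp2_scan ps w

-- ===== PORT B =====
-- `names = "one two ... nine".split(); word_to_digit = {name: str(i) for i, name in enumerate(names, 1)}`
def fdp2_alt_pairs : List (String × String) :=
  ((PySem.Str.split₀ "one two three four five six seven eight nine").zipIdx 1).map
    (fun p => (p.1, PySem.Int.toStr (p.2 : Int)))

-- `j = word.find(key); if j != -1 and (best is None or j < best[0]): best = (j, digit)`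
def fdp2_bestLoop (w : List Char) : List (String × String) → Option (Int × String) → Option (Int × String)
  | [], best => best
  | (k, d) :: ps, best =>
      let j := PySem.Chars.find w k.toList
      fdp2_bestLoop w ps
        (if j != -1 && (match best with | none => true | some b => decide (j < b.1)) then some (j, d) else best)

-- `for i in range(len(word)): if word[i].isdigit(): …; break`
def fdp2_digitLoop : List Char → Int → Option (Int × String) → Option (Int × String)
  | [], _, best => best
  | c :: rest, i, best =>
      if PySem.Chars.isdigit c then
        (if (match best with | none => true | some b => decide (i < b.1)) then some (i, String.ofList [c]) else best)
      else fdp2_digitLoop rest (i + 1) best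

def find_digit_part_2_alt (word : String) (reverse : Bool) : Option String :=
  let ps := if reverse then fdp2_alt_pairs.map (fun kd => (String.ofList kd.1.toList.reverse, kd.2)) else fdp2_alt_pairs
  let w := if reverse then word.toList.reverse else word.toList
  (fdp2_digitLoop w 0 (fdp2_bestLoop w ps none)).map Prod.snd

-- ===== PRECONDITION & SPEC =====
def Spec_find_digit_part_2 (word : String) (reverse : Bool) (out : Option String) : Prop := out = find_digit_part_2_alt word reverse
instance (word : String) (reverse : Bool) (out : Option String) : Decidable (Spec_find_digit_part_2 word reverse out) := by unfold Spec_find_digit_part_2; infer_instance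

-- ===== CLAIM (what is proved, stated in full; the proofs are below) =====
def Claim_equal_find_digit_part_2 : Prop := ∀ (word : String) (reverse : Bool), Dom_find_digit_part_2 word reverse → Spec_find_digit_part_2 word reverse (find_digit_part_2 word reverse)

-- ===== LEMMAS AND PROOFS =====

-- proof-side abstraction: left-biased minimum on (index, digit) candidates
def fdp2_merge (a b : Option (Int × String)) : Option (Int × String) :=
  match a, b with
  | none, b => b
  | some x, none => some x
  | some x, some y => if y.1 < x.1 then some y else some x

def fdp2_single (j : Int) (d : String) : Option (Int × String) :=
  if j = -1 then none else some (j, d)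

def fdp2_minIdx (w : List Char) : List (String × String) → Option (Int × String)
  | [] => none
  | (k, d) :: ps => fdp2_merge (fdp2_single (PySem.Chars.find w k.toList) d) (fdp2_minIdx w ps)

def fdp2_dFirst : List Char → Int → Option (Int × String)
  | [], _ => none
  | c :: rest, i =>
      if PySem.Chars.isdigit c then some (i, String.ofList [c]) else fdp2_dFirst rest (i + 1)

def fdp2_shift (o : Option (Int × String)) : Option (Int × String) :=
  o.map (fun p => (p.1 + 1, p.2))

def fdp2_nonneg (o : Option (Int × String)) : Prop :=
  match o with | none => True | some p => 0 ≤ p.1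

theorem fdp2_merge_assoc (a b c : Option (Int × String)) :
    fdp2_merge (fdp2_merge a b) c = fdp2_merge a (fdp2_merge b c) := by
  rcases a with _ | x
  · rfl
  rcases b with _ | y
  · rfl
  rcases c with _ | z
  · show fdp2_merge (if y.1 < x.1 then some y else some x) none
        = (if y.1 < x.1 then some y else some x)
    by_cases h1 : y.1 < x.1
    · rw [if_pos h1]
      rfl
    · rw [if_neg h1]
      rfl
  · show fdp2_merge (if y.1 < x.1 then some y else some x) (some z)
        = fdp2_merge (some x) (if z.1 < y.1 then some z else some y)
    by_cases h1 : y.1 < x.1 <;> by_cases h2 : z.1 < y.1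
    · rw [if_pos h1, if_pos h2]
      show (if z.1 < y.1 then some z else some y) = (if z.1 < x.1 then some z else some x)
      rw [if_pos h2, if_pos (lt_trans h2 h1)]
    · rw [if_pos h1, if_neg h2]
      show (if z.1 < y.1 then some z else some y) = (if y.1 < x.1 then some y else some x)
      rw [if_neg h2, if_pos h1]
    · rw [if_neg h1, if_pos h2]
    · rw [if_neg h1, if_neg h2]
      show (if z.1 < x.1 then some z else some x) = (if y.1 < x.1 then some y else some x)
      rw [if_neg (show ¬ z.1 < x.1 by omega), if_neg h1]

theorem fdp2_bestLoop_merge (w : List Char) (ps : List (String × String))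
    (acc : Option (Int × String)) :
    fdp2_bestLoop w ps acc = fdp2_merge acc (fdp2_minIdx w ps) := by
  induction ps generalizing acc with
  | nil => cases acc <;> rfl
  | cons kd ps ih =>
      obtain ⟨k, d⟩ := kd
      have hstep :
          (if PySem.Chars.find w k.toList != -1 &&
              (match acc with | none => true | some b => decide (PySem.Chars.find w k.toList < b.1))
            then some (PySem.Chars.find w k.toList, d) else acc)
          = fdp2_merge acc (fdp2_single (PySem.Chars.find w k.toList) d) := by
        by_cases hj : PySem.Chars.find w k.toList = -1
        · rcases acc with _ | b <;> simp [fdp2_merge, fdp2_single, hj]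
        · rcases acc with _ | b
          · simp [fdp2_merge, fdp2_single, hj]
          · by_cases hlt : PySem.Chars.find w k.toList < b.1 <;>
              simp [fdp2_merge, fdp2_single, hj, hlt]
      simp only [fdp2_bestLoop, fdp2_minIdx]
      rw [hstep, ih, fdp2_merge_assoc]

theorem fdp2_digitLoop_merge (w : List Char) (i : Int) (acc : Option (Int × String)) :
    fdp2_digitLoop w i acc = fdp2_merge acc (fdp2_dFirst w i) := by
  induction w generalizing i acc with
  | nil => cases acc <;> rfl
  | cons c rest ih =>
      simp only [fdp2_digitLoop, fdp2_dFirst]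
      by_cases hd : PySem.Chars.isdigit c
      · rcases acc with _ | b
        · simp [hd, fdp2_merge]
        · by_cases hlt : i < b.1 <;> simp [hd, hlt, fdp2_merge]
      · simp only [hd, if_false, Bool.false_eq_true, ih]

-- Python str.find on a cons cell: hit at 0, or shifted find in the tail
theorem fdp2_find_cons (c : Char) (rest sub : List Char) :
    PySem.Chars.find (c :: rest) sub =
      if sub <+: (c :: rest) then 0
      else if PySem.Chars.find rest sub = -1 then -1 else PySem.Chars.find rest sub + 1 := by
  by_cases hp : sub <+: (c :: rest)
  · have hinf : sub <:+: (c :: rest) := hp.isInfix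
    have h0 : 0 ≤ PySem.Chars.find (c :: rest) sub :=
      (PySem.Chars.find_nonneg_iff _ _).mpr hinf
    obtain ⟨-, hmin⟩ := PySem.Chars.find_spec (s := c :: rest) (sub := sub) h0
    have ht : (PySem.Chars.find (c :: rest) sub).toNat = 0 := by
      by_contra hne
      exact hmin 0 (Nat.pos_of_ne_zero hne) (by simpa using hp)
    rw [if_pos hp]
    omega
  · by_cases hr : sub <:+: rest
    · have hk0 : 0 ≤ PySem.Chars.find rest sub := (PySem.Chars.find_nonneg_iff _ _).mpr hr
      obtain ⟨hkpre, hkmin⟩ := PySem.Chars.find_spec (s := rest) (sub := sub) hk0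
      have hinf : sub <:+: (c :: rest) := List.infix_cons hr
      have h0 : 0 ≤ PySem.Chars.find (c :: rest) sub :=
        (PySem.Chars.find_nonneg_iff _ _).mpr hinf
      obtain ⟨hnpre, hnmin⟩ := PySem.Chars.find_spec (s := c :: rest) (sub := sub) h0
      set n := (PySem.Chars.find (c :: rest) sub).toNat with hn
      set kk := (PySem.Chars.find rest sub).toNat with hk
      have hnpos : n ≠ 0 := by
        intro h
        apply hp
        simpa [h] using hnpre
      have hdrop : (c :: rest).drop n = rest.drop (n - 1) := by
        rcases Nat.exists_eq_succ_of_ne_zero hnpos with ⟨m, hm⟩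
        rw [hm]
        simp
      have hle1 : kk ≤ n - 1 := by
        by_contra hgt
        exact hkmin (n - 1) (by omega) (by rw [← hdrop]; exact hnpre)
      have hle2 : n ≤ kk + 1 := by
        by_contra hgt
        exact hnmin (kk + 1) (by omega) (by simpa using hkpre)
      have hfr : PySem.Chars.find rest sub ≠ -1 := by omega
      rw [if_neg hp, if_neg hfr]
      omega
    · have h1 : PySem.Chars.find (c :: rest) sub = -1 := by
        rw [PySem.Chars.find_eq_neg_one_iff, List.infix_cons_iff]
        tauto
      have h2 : PySem.Chars.find rest sub = -1 :=
        (PySem.Chars.find_eq_neg_one_iff _ _).mpr hr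
      rw [if_neg hp, h1, h2, if_pos rfl]

theorem fdp2_single_nonneg (j : Int) (d : String) (h : -1 ≤ j) :
    fdp2_nonneg (fdp2_single j d) := by
  unfold fdp2_single fdp2_nonneg
  split_ifs with h1
  · trivial
  · show (0 : Int) ≤ j
    omega

theorem fdp2_merge_nonneg {a b : Option (Int × String)}
    (ha : fdp2_nonneg a) (hb : fdp2_nonneg b) : fdp2_nonneg (fdp2_merge a b) := by
  rcases a with _ | x
  · exact hb
  · rcases b with _ | y
    · exact ha
    · show fdp2_nonneg (if y.1 < x.1 then some y else some x)
      split_ifs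
      · exact hb
      · exact ha

theorem fdp2_minIdx_nonneg (w : List Char) (ps : List (String × String)) :
    fdp2_nonneg (fdp2_minIdx w ps) := by
  induction ps with
  | nil => trivial
  | cons kd ps ih =>
      obtain ⟨k, d⟩ := kd
      exact fdp2_merge_nonneg
        (fdp2_single_nonneg _ _ (PySem.Chars.neg_one_le_find _ _)) ih

theorem fdp2_dFirst_nonneg (w : List Char) (i : Int) (h : 0 ≤ i) :
    fdp2_nonneg (fdp2_dFirst w i) := by
  induction w generalizing i with
  | nil => trivial
  | cons c rest ih =>
      simp only [fdp2_dFirst]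
      split_ifs
      · exact h
      · exact ih (i + 1) (by omega)

-- merge with a position-0 hit on the left wins against any nonnegative candidate
theorem fdp2_merge_zero_left (d : String) (b : Option (Int × String))
    (hb : fdp2_nonneg b) : fdp2_merge (some (0, d)) b = some (0, d) := by
  rcases b with _ | y
  · rfl
  · show (if y.1 < (0:Int) then some y else some (0, d)) = some (0, d)
    have hy : (0:Int) ≤ y.1 := hb
    rw [if_neg (by omega)]

theorem fdp2_merge_shift (a b : Option (Int × String)) :
    fdp2_merge (fdp2_shift a) (fdp2_shift b) = fdp2_shift (fdp2_merge a b) := by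
  rcases a with _ | x <;> rcases b with _ | y <;> try rfl
  show (if y.1 + 1 < x.1 + 1 then some (y.1 + 1, y.2) else some (x.1 + 1, x.2))
      = fdp2_shift (if y.1 < x.1 then some y else some x)
  by_cases h : y.1 < x.1
  · rw [if_pos (by omega), if_pos h]
    rfl
  · rw [if_neg (by omega), if_neg h]
    rfl

theorem fdp2_merge_shift_zero_right (a : Option (Int × String)) (ha : fdp2_nonneg a)
    (d : String) : fdp2_merge (fdp2_shift a) (some (0, d)) = some (0, d) := by
  rcases a with _ | x
  · rfl
  · show (if (0:Int) < x.1 + 1 then some (0, d) else some (x.1 + 1, x.2)) = some (0, d)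
    have hx : (0:Int) ≤ x.1 := ha
    rw [if_pos (by omega)]

theorem fdp2_minIdx_cons (c : Char) (rest : List Char) (ps : List (String × String)) :
    fdp2_minIdx (c :: rest) ps =
      match fdp2_tryPairs (c :: rest) ps with
      | some d => some (0, d)
      | none => fdp2_shift (fdp2_minIdx rest ps) := by
  induction ps with
  | nil => rfl
  | cons kd ps ih =>
      obtain ⟨k, d⟩ := kd
      by_cases hsw : PySem.Chars.startswith (c :: rest) k.toList
      · have hpre : k.toList <+: (c :: rest) := (PySem.Chars.startswith_iff _ _).mp hsw
        have hfind : PySem.Chars.find (c :: rest) k.toList = 0 := by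
          rw [fdp2_find_cons, if_pos hpre]
        have hs : fdp2_single (PySem.Chars.find (c :: rest) k.toList) d = some (0, d) := by
          rw [hfind]
          rfl
        simp only [fdp2_minIdx, fdp2_tryPairs, hsw, if_true, hs]
        exact fdp2_merge_zero_left d _ (fdp2_minIdx_nonneg _ _)
      · have hpre : ¬ k.toList <+: (c :: rest) := by
          intro h; exact hsw ((PySem.Chars.startswith_iff _ _).mpr h)
        have hsingle : fdp2_single (PySem.Chars.find (c :: rest) k.toList) d
            = fdp2_shift (fdp2_single (PySem.Chars.find rest k.toList) d) := by
          rw [fdp2_find_cons, if_neg hpre]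
          have hge := PySem.Chars.neg_one_le_find rest k.toList
          by_cases hm : PySem.Chars.find rest k.toList = -1
          · rw [if_pos hm]
            unfold fdp2_single
            rw [if_pos rfl, if_pos hm]
            rfl
          · rw [if_neg hm]
            unfold fdp2_single
            rw [if_neg (by omega), if_neg hm]
            rfl
        rcases htp : fdp2_tryPairs (c :: rest) ps with _ | d'
        · simp only [fdp2_minIdx, fdp2_tryPairs, hsw, if_false, Bool.false_eq_true, hsingle,
            ih, htp]
          exact fdp2_merge_shift _ _
        · simp only [fdp2_minIdx, fdp2_tryPairs, hsw, if_false, Bool.false_eq_true, hsingle,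
            ih, htp]
          exact fdp2_merge_shift_zero_right _
            (fdp2_single_nonneg _ _ (PySem.Chars.neg_one_le_find _ _)) _

theorem fdp2_dFirst_succ (w : List Char) (i : Int) :
    fdp2_dFirst w (i + 1) = fdp2_shift (fdp2_dFirst w i) := by
  induction w generalizing i with
  | nil => rfl
  | cons c rest ih =>
      simp only [fdp2_dFirst]
      split_ifs
      · rfl
      · exact ih (i + 1)

theorem fdp2_map_snd_shift (a : Option (Int × String)) :
    (fdp2_shift a).map Prod.snd = a.map Prod.snd := by
  rcases a with _ | x <;> rfl

-- main lemma: B's minimum-index selection equals A's interleaved scan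
theorem fdp2_main (w : List Char) (ps : List (String × String))
    (hne : ∀ p ∈ ps, p.1.toList ≠ []) :
    (fdp2_merge (fdp2_minIdx w ps) (fdp2_dFirst w 0)).map Prod.snd = fdp2_scan ps w := by
  induction w with
  | nil =>
      have hmin : fdp2_minIdx [] ps = none := by
        induction ps with
        | nil => rfl
        | cons kd ps ihp =>
            obtain ⟨k, d⟩ := kd
            have hk : k.toList ≠ [] := hne (k, d) (by simp)
            have hf : PySem.Chars.find [] k.toList = -1 := by
              rw [PySem.Chars.find_eq_neg_one_iff]
              intro h
              exact hk (List.eq_nil_of_infix_nil h)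
            have hs : fdp2_single (PySem.Chars.find [] k.toList) d = none := by
              rw [hf]
              rfl
            simp only [fdp2_minIdx, hs]
            exact ihp (fun p hp => hne p (by simp [hp]))
      rw [hmin]
      rfl
  | cons c rest ih =>
      rw [fdp2_minIdx_cons]
      rcases htp : fdp2_tryPairs (c :: rest) ps with _ | d
      · simp only []
        by_cases hd : PySem.Chars.isdigit c
        · have hdf : fdp2_dFirst (c :: rest) 0 = some (0, String.ofList [c]) := by
            simp [fdp2_dFirst, hd]
          rw [hdf, fdp2_merge_shift_zero_right _ (fdp2_minIdx_nonneg _ _)]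
          simp [fdp2_scan, htp, hd]
        · have hdf : fdp2_dFirst (c :: rest) 0 = fdp2_shift (fdp2_dFirst rest 0) := by
            show (if PySem.Chars.isdigit c then _ else fdp2_dFirst rest (0 + 1)) = _
            rw [if_neg (by simpa using hd)]
            exact fdp2_dFirst_succ rest 0
          rw [hdf, fdp2_merge_shift, fdp2_map_snd_shift, ih]
          simp [fdp2_scan, htp, hd]
      · simp only []
        rw [fdp2_merge_zero_left d _ (fdp2_dFirst_nonneg _ _ le_rfl)]
        simp [fdp2_scan, htp]

theorem fdp2_keys_ne (reverse : Bool) :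
    ∀ p ∈ (if reverse then fdp2_pairs.map (fun kd => (String.ofList kd.1.toList.reverse, kd.2)) else fdp2_pairs),
      p.1.toList ≠ [] := by
  cases reverse <;> decide

-- ===== VERDICT (by name: the statement is the Claim_ definition above) =====
theorem find_digit_part_2_spec : Claim_equal_find_digit_part_2 := by
  intro word reverse _
  have hpairs : fdp2_alt_pairs = fdp2_pairs := by decide
  have key : ∀ (ps : List (String × String)) (w : List Char), (∀ p ∈ ps, p.1.toList ≠ []) →
      fdp2_scan ps w = (fdp2_digitLoop w 0 (fdp2_bestLoop w ps none)).map Prod.snd := by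
    intro ps w h
    rw [fdp2_bestLoop_merge, fdp2_digitLoop_merge]
    exact (fdp2_main w ps h).symm
  show find_digit_part_2 word reverse = find_digit_part_2_alt word reverse
  unfold find_digit_part_2 find_digit_part_2_alt
  rw [hpairs]
  exact key _ _ (fdp2_keys_ne reverse)
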